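-- pv_equiv track=rewrite | github.com/amaurydelassus/crypto | TP1-1.py | double_lettre
-- ===== SOURCE A (Python) =====
-- def double_lettre(text):
--     i = 1
--     for char in text:
--         if i == len(text):
--             return ""
--         if char == text[i]:
--             return char
--         i += 1
-- ===== SOURCE B (Python) =====
-- def double_lettre(text):
--     best = None  # (position, character) of the earliest doubled letter found so far
--     for c in set(text):
--         pos = text.find(c + c)
--         if pos != -1 and (best is None or pos < best[0]):
--             best = (pos, c)
--     return best[1] if best is not None else ""
-- ===== Notes on version B (the rewrite author's own statement) =====
-- stated objective: alternative
-- what changed: B searches for the doubled substring c+c with str.find for each distinct character and keeps the earliest hit, instead of A's single left-to-right scan with a look-ahead index; no adjacent-pair walk remains.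
-- intended difference: On the empty string A's for-loop body never runs and it falls through to an implicit None, an accident of the loop shape; B returns '', the empty-string result A itself produces for every other double-free input, which is the intended answer. — e.g. on double_lettre(""): A returns none, B returns some ""
import Mathlib
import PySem

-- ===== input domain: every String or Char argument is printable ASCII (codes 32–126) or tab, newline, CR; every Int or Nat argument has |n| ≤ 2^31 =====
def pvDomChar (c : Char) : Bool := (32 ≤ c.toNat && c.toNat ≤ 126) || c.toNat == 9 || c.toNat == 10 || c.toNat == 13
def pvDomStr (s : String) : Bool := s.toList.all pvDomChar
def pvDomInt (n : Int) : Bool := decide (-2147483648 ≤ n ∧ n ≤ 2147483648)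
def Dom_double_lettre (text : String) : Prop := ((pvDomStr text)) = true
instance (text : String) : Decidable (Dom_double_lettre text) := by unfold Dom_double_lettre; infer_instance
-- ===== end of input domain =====

-- B replaces A's indexed left-to-right scan by a substring search: for each distinct
-- character c it looks up text.find(c+c) and keeps the earliest hit (objective: alternative).

-- ===== PORT A =====
-- A's for-loop over the characters, carrying the look-ahead index i (starts at 1);
-- text[i] is ported with PySem.List.pyGet? (none = IndexError, unreachable since i ≤ len).
def dlA_loop (full : List Char) (i : Nat) : List Char → Option String
  | [] => none
  | c :: rest =>
      if i = full.length then some ""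
      else
        match PySem.List.pyGet? full (Int.ofNat i) with
        | none => none   -- Python would raise IndexError; unreachable (i < len here)
        | some c2 =>
            if c == c2 then some (String.ofList [c])
            else dlA_loop full (i + 1) rest

def double_lettre (text : String) : Option String :=
  dlA_loop text.toList 1 text.toList

-- ===== PORT B =====
-- Source B's loop body: pos = text.find(c + c); keep (pos, c) if pos != -1 and it improves best.
-- text.find(c + c) is PySem.Str.find, taken on .toList via the bridge (= PySem.Chars.find).
def dlB_step (cs : List Char) (best : Option (Int × Char)) (c : Char) : Option (Int × Char) :=
  let pos := PySem.Chars.find cs [c, c]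
  match best with
  | none => if pos ≠ -1 then some (pos, c) else none
  | some (p, b) => if pos ≠ -1 ∧ pos < p then some (pos, c) else some (p, b)

-- 'for c in set(text)': fold over set(text); the kept minimum does not depend on the
-- iteration order, since distinct characters have distinct find positions.
def double_lettre_alt (text : String) : Option String :=
  match (PySem.Set.ofList text.toList).foldl (dlB_step text.toList) none with
  | some (_, c) => some (String.ofList [c])
  | none => some ""

-- ===== PRECONDITION & SPEC =====
-- On the empty string A's for-loop body never runs and it falls through to an implicit None,
-- an accident of the loop shape; B returns "", the empty-string result A itself
-- produces for every other double-free input, which is the intended answer.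
def D_double_lettre (text : String) : Prop := text = ""
instance (text : String) : Decidable (D_double_lettre text) := by unfold D_double_lettre; infer_instance
def Spec_double_lettre (text : String) (out : Option String) : Prop := ¬ D_double_lettre text → out = double_lettre_alt text
instance (text : String) (out : Option String) : Decidable (Spec_double_lettre text out) := by unfold Spec_double_lettre; infer_instance
def pvDiffWitness_double_lettre : String := ""
def pvDiffWitnessOut_double_lettre : (Option String) × (Option String) := (none, some "")

-- ===== CLAIM (what is proved, stated in full; the proofs are below) =====
def Claim_unchanged_double_lettre : Prop := ∀ (text : String), Dom_double_lettre text → Spec_double_lettre text (double_lettre text)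
def Claim_changed_double_lettre : Prop := Dom_double_lettre (pvDiffWitness_double_lettre) ∧ D_double_lettre (pvDiffWitness_double_lettre) ∧ double_lettre (pvDiffWitness_double_lettre) = pvDiffWitnessOut_double_lettre.1 ∧ double_lettre_alt (pvDiffWitness_double_lettre) = pvDiffWitnessOut_double_lettre.2 ∧ pvDiffWitnessOut_double_lettre.1 ≠ pvDiffWitnessOut_double_lettre.2
def Claim_exact_double_lettre : Prop := ∀ (text : String), Dom_double_lettre text → D_double_lettre text → double_lettre text ≠ double_lettre_alt text

-- ===== LEMMAS AND PROOFS =====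

-- Reference function for the proofs: the first adjacent duplicate, scanning structurally.
def firstDup : List Char → Option Char
  | a :: b :: rest => if a == b then some a else firstDup (b :: rest)
  | _ => none

-- A's loop equals the reference (invariant: the remaining chars cs are full.drop (i-1)).
theorem dlA_loop_eq (full : List Char) :
    ∀ (cs : List Char) (i : Nat), 1 ≤ i → full.drop (i - 1) = cs →
      dlA_loop full i cs =
        match firstDup cs with
        | some a => some (String.ofList [a])
        | none => if cs.isEmpty then none else some "" := by
  intro cs
  induction cs with
  | nil => intro i _ _; simp [dlA_loop, firstDup]
  | cons c rest ih =>
      intro i hi hdrop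
      have hlt : i - 1 < full.length := by
        by_contra h
        rw [List.drop_eq_nil_of_le (by omega)] at hdrop
        exact absurd hdrop (by simp)
      have hlen : full.length - (i - 1) = rest.length + 1 := by
        have := congrArg List.length hdrop
        simpa [List.length_drop] using this
      have hdrop_i : full.drop i = rest := by
        have h1 : (full.drop (i - 1)).tail = full.drop (i - 1 + 1) := List.tail_drop
        rw [hdrop] at h1
        rw [show i = i - 1 + 1 by omega, ← h1]
        rfl
      cases rest with
      | nil =>
          have hEq : i = full.length := by simp at hlen; omega
          simp [dlA_loop, firstDup, hEq]
      | cons c2 rest' =>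
          have hne : i ≠ full.length := by simp at hlen; omega
          have hget : PySem.List.pyGet? full (Int.ofNat i) = some c2 := by
            have : full[i]? = some c2 := by
              have := congrArg List.head? hdrop_i
              simpa [List.head?_drop] using this
            simpa [PySem.List.pyGet?_natCast] using this
          rw [dlA_loop, if_neg hne, hget]
          by_cases hc : c = c2
          · simp [firstDup, hc]
          · rw [if_neg (by simp)]
            rw [ih (i + 1) (by omega) (by simpa using hdrop_i)]
            simp [firstDup, hc]

-- firstDup characterised by positions: none ↔ no doubled pair anywhere; some a gives a
-- position i carrying [a,a] with no doubled pair of any character strictly before it.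
theorem firstDup_spec : ∀ (l : List Char),
    match firstDup l with
    | none => ∀ (j : Nat) (c : Char), ¬ [c, c] <+: l.drop j
    | some a => ∃ i : Nat, [a, a] <+: l.drop i ∧ ∀ j < i, ∀ c, ¬ [c, c] <+: l.drop j := by
  intro l
  induction l with
  | nil => simp [firstDup]
  | cons x t ih =>
      cases t with
      | nil =>
          simp only [firstDup]
          intro j c h
          have := h.length_le
          simp [List.length_drop] at this
          omega
      | cons y rest =>
          by_cases hxy : x = y
          · subst hxy
            simp only [firstDup, beq_self_eq_true, if_true]
            exact ⟨0, ⟨rest, rfl⟩, by omega⟩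
          · rw [show firstDup (x :: y :: rest) = firstDup (y :: rest) by
              simp [firstDup, hxy]]
            have h0 : ∀ c : Char, ¬ [c, c] <+: (x :: y :: rest) := by
              intro c hpre
              rcases hpre with ⟨s, hs⟩
              simp at hs
              exact hxy (hs.1 ▸ hs.2.1.symm ▸ rfl)
            cases hfd : firstDup (y :: rest) with
            | none =>
                rw [hfd] at ih
                intro j c
                cases j with
                | zero => exact h0 c
                | succ j' => simpa [List.drop_succ_cons] using ih j' c
            | some a =>
                rw [hfd] at ih
                obtain ⟨i, hpre, hmin⟩ := ih
                refine ⟨i + 1, by simpa [List.drop_succ_cons] using hpre, ?_⟩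
                intro j hj c
                cases j with
                | zero => exact h0 c
                | succ j' => simpa [List.drop_succ_cons] using hmin j' (by omega) c

-- find equals the unique position with an occurrence there and none before.
theorem find_eq_of (l : List Char) (sub : List Char) (i : Nat)
    (h1 : sub <+: l.drop i) (h2 : ∀ j < i, ¬ sub <+: l.drop j) :
    PySem.Chars.find l sub = (i : Int) := by
  have hinf : sub <:+: l :=
    (PySem.Chars.isIn_iff_infix _ _).mp ((PySem.Chars.exists_prefix_drop_iff_isIn _ _).mp ⟨i, h1⟩)
  have hnn : 0 ≤ PySem.Chars.find l sub := (PySem.Chars.find_nonneg_iff _ _).mpr hinf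
  obtain ⟨hp, hq⟩ := PySem.Chars.find_spec (s := l) (sub := sub) hnn
  have : (PySem.Chars.find l sub).toNat = i := by
    rcases Nat.lt_trichotomy (PySem.Chars.find l sub).toNat i with h | h | h
    · exact absurd hp (h2 _ h)
    · exact h
    · exact absurd h1 (hq i h)
  omega

theorem fold_keep_none (l : List Char) (hall : ∀ c : Char, PySem.Chars.find l [c, c] = -1) :
    ∀ (cs : List Char), cs.foldl (dlB_step l) none = none := by
  intro cs
  induction cs with
  | nil => rfl
  | cons c cs' ih =>
      have : dlB_step l none c = none := by simp [dlB_step, hall c]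
      simpa [this] using ih

-- The fold computes the earliest doubled letter: invariant over the processed prefix.
theorem fold_min (l : List Char) (i : Nat) (a : Char)
    (hfa : PySem.Chars.find l [a, a] = (i : Int))
    (H1 : ∀ c : Char, PySem.Chars.find l [c, c] ≠ -1 → (i : Int) ≤ PySem.Chars.find l [c, c])
    (H2 : ∀ c : Char, PySem.Chars.find l [c, c] = (i : Int) → c = a) :
    ∀ (cs : List Char) (b : Option (Int × Char)),
      (b = some ((i : Int), a) ∨ (a ∈ cs ∧ (b = none ∨ ∃ p c', b = some (p, c') ∧ (i : Int) < p))) →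
      cs.foldl (dlB_step l) b = some ((i : Int), a) := by
  intro cs
  induction cs with
  | nil =>
      intro b hb
      rcases hb with hb | ⟨ha, _⟩
      · simpa using hb
      · simp at ha
  | cons c cs' ih =>
      intro b hb
      have hine : (i : Int) ≠ -1 := by omega
      rw [List.foldl_cons]
      rcases hb with hb | ⟨ha, hb⟩
      · -- best already (i, a): c cannot improve it
        subst hb
        have hkeep : dlB_step l (some ((i : Int), a)) c = some ((i : Int), a) := by
          by_cases hpos : PySem.Chars.find l [c, c] = -1
          · simp [dlB_step, hpos]
          · have := H1 c hpos
            simp only [dlB_step]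
            rw [if_neg (fun h => by omega)]
        rw [hkeep]; exact ih _ (Or.inl rfl)
      · by_cases hca : c = a
        · -- processing a itself: best becomes (i, a)
          subst hca
          have hstep : dlB_step l b c = some ((i : Int), c) := by
            rcases hb with hb | ⟨p, c', hb, hip⟩
            · subst hb; simp [dlB_step, hfa, hine]
            · subst hb; simp only [dlB_step, hfa]
              rw [if_pos ⟨hine, hip⟩]
          rw [hstep]; exact ih _ (Or.inl rfl)
        · have ha' : a ∈ cs' := by
            rcases List.mem_cons.mp ha with h | h
            · exact absurd h.symm hca
            · exact h
          by_cases hpos : PySem.Chars.find l [c, c] = -1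
          · -- c has no double: best unchanged
            have hstep : dlB_step l b c = b := by
              rcases hb with hb | ⟨p, c', hb, _⟩ <;> subst hb <;> simp [dlB_step, hpos]
            rw [hstep]; exact ih _ (Or.inr ⟨ha', hb⟩)
          · -- c's double is strictly later than position i
            have hgt : (i : Int) < PySem.Chars.find l [c, c] := by
              rcases lt_or_eq_of_le (H1 c hpos) with h | h
              · exact h
              · exact absurd (H2 c h.symm) hca
            rcases hb with hb | ⟨p, c', hb, hip⟩
            · subst hb
              have hstep : dlB_step l none c = some (PySem.Chars.find l [c, c], c) := by
                simp [dlB_step, hpos]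
              rw [hstep]; exact ih _ (Or.inr ⟨ha', Or.inr ⟨_, c, rfl, hgt⟩⟩)
            · subst hb
              by_cases himp : PySem.Chars.find l [c, c] < p
              · have hstep : dlB_step l (some (p, c')) c = some (PySem.Chars.find l [c, c], c) := by
                  simp only [dlB_step]; rw [if_pos ⟨hpos, himp⟩]
                rw [hstep]; exact ih _ (Or.inr ⟨ha', Or.inr ⟨_, c, rfl, hgt⟩⟩)
              · have hstep : dlB_step l (some (p, c')) c = some (p, c') := by
                  simp only [dlB_step]; rw [if_neg (fun h => by omega)]
                rw [hstep]; exact ih _ (Or.inr ⟨ha', Or.inr ⟨p, c', rfl, hip⟩⟩)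

-- B equals the reference.
theorem dlB_eq (text : String) :
    double_lettre_alt text =
      match firstDup text.toList with
      | some a => some (String.ofList [a])
      | none => some "" := by
  unfold double_lettre_alt
  have hs := firstDup_spec text.toList
  cases hfd : firstDup text.toList with
  | none =>
      rw [hfd] at hs
      have hall : ∀ c : Char, PySem.Chars.find text.toList [c, c] = -1 := by
        intro c
        rw [PySem.Chars.find_eq_neg_one_iff]
        intro hinf
        obtain ⟨j, hj⟩ := (PySem.Chars.exists_prefix_drop_iff_isIn _ _).mpr
          ((PySem.Chars.isIn_iff_infix _ _).mpr hinf)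
        exact hs j c hj
      rw [fold_keep_none text.toList hall]
  | some a =>
      rw [hfd] at hs
      obtain ⟨i, hpre, hmin⟩ := hs
      have hfa : PySem.Chars.find text.toList [a, a] = (i : Int) :=
        find_eq_of _ _ i hpre (fun j hj => hmin j hj a)
      have H1 : ∀ c : Char, PySem.Chars.find text.toList [c, c] ≠ -1 →
          (i : Int) ≤ PySem.Chars.find text.toList [c, c] := by
        intro c hc
        have hinf : [c, c] <:+: text.toList := (PySem.Chars.find_ne_neg_one_iff _ _).mp hc
        have hnn : 0 ≤ PySem.Chars.find text.toList [c, c] :=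
          (PySem.Chars.find_nonneg_iff _ _).mpr hinf
        obtain ⟨hp, _⟩ := PySem.Chars.find_spec (s := text.toList) (sub := [c, c]) hnn
        by_contra h
        have hlt : (PySem.Chars.find text.toList [c, c]).toNat < i := by omega
        exact hmin _ hlt c hp
      have H2 : ∀ c : Char, PySem.Chars.find text.toList [c, c] = (i : Int) → c = a := by
        intro c hc
        have hnn : 0 ≤ PySem.Chars.find text.toList [c, c] := by omega
        obtain ⟨hp, _⟩ := PySem.Chars.find_spec (s := text.toList) (sub := [c, c]) hnn
        rw [hc] at hp
        simp only [Int.toNat_natCast] at hp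
        obtain ⟨s, hsp⟩ := hp
        obtain ⟨s', hsp'⟩ := hpre
        rw [← hsp'] at hsp
        simp at hsp
        exact hsp.1
      have hmem : a ∈ PySem.Set.ofList text.toList := by
        rw [PySem.Set.mem_ofList]
        have : a ∈ text.toList.drop i := hpre.subset (by simp)
        exact List.mem_of_mem_drop this
      rw [fold_min text.toList i a hfa H1 H2 _ none (Or.inr ⟨hmem, Or.inl rfl⟩)]

-- ===== VERDICT (by name: the statements are the Claim_ definitions above) =====
theorem double_lettre_spec : Claim_unchanged_double_lettre := by
  intro text _ hD
  unfold D_double_lettre at hD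
  have hne : text.toList ≠ [] := by
    intro h
    exact hD (by cases text; simp at h; simp [h])
  unfold double_lettre
  rw [dlA_loop_eq text.toList text.toList 1 (le_refl 1) (by simp), dlB_eq]
  cases firstDup text.toList with
  | some a => rfl
  | none => simp [List.isEmpty_iff, hne]

theorem double_lettre_changed : Claim_changed_double_lettre := by
  unfold Claim_changed_double_lettre; decide

theorem double_lettre_tight : Claim_exact_double_lettre := by
  intro text _ hD
  unfold D_double_lettre at hD
  subst hD
  decide
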